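-- pv_equiv track=rewrite | github.com/yebeike/NeSy-Edge | experiments/thesis_rebuild_20260315/rq34/scripts/run_rq34_hierarchical_resumable_20260316.py | _window_around_alert
-- ===== SOURCE A (Python) =====
-- from typing import Dict, Iterable, List, Mapping, Sequence, Set, Tuple
--
-- def _window_around_alert(raw_log: str, selected_alert: str, radius: int) -> List[str]:
--     lines = [line for line in str(raw_log or "").split("\n") if line.strip()]
--     if not lines:
--         return []
--     idx = -1
--     alert = str(selected_alert or "").strip()
--     if alert:
--         for i, line in enumerate(lines):
--             if line.strip() == alert:
--                 idx = i
--                 break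
--         if idx < 0:
--             alert_lower = alert.lower()
--             for i, line in enumerate(lines):
--                 if alert_lower and alert_lower in line.lower():
--                     idx = i
--                     break
--     if idx < 0:
--         return lines[-min(len(lines), radius * 2 + 1) :]
--     lo = max(0, idx - radius)
--     hi = min(len(lines), idx + radius + 1)
--     return lines[lo:hi]
-- ===== SOURCE B (Python) =====
-- def _window_around_alert(raw_log: str, selected_alert: str, radius: int):
--     lines = [ln for ln in raw_log.split("\n") if ln.strip()]
--     if not lines:
--         return []
--     alert = selected_alert.strip()
--     idx = None
--     if alert:
--         al = alert.lower()
--         sub_idx = None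
--         for i, ln in enumerate(lines):
--             if ln.strip() == alert:
--                 idx = i
--                 break
--             if sub_idx is None and al in ln.lower():
--                 sub_idx = i
--         if idx is None:
--             idx = sub_idx
--     if idx is None:
--         return lines[-min(len(lines), 2 * radius + 1):]
--     lo = max(0, idx - radius)
--     hi = min(len(lines), idx + radius + 1)
--     return lines[lo:hi]
-- ===== Notes on version B (the rewrite author's own statement) =====
-- stated objective: alternative
-- what changed: Replaces A's two sequential index-hunting scans (a full exact-match pass, then a full substring pass) by a single scan that breaks on the first exact match while recording the first substring match on the way.
import Mathlib
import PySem

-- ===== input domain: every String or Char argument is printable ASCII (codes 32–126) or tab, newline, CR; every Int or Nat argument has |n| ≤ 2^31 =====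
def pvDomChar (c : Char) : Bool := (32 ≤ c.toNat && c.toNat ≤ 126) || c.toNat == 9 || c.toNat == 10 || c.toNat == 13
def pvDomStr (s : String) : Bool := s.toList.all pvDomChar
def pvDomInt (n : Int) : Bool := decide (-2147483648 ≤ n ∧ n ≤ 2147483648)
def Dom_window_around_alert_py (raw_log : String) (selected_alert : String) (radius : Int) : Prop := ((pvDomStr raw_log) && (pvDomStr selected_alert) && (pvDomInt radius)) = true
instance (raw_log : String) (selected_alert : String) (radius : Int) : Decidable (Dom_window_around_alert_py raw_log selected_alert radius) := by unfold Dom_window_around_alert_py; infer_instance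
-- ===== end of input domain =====

-- B replaces A's two sequential index-hunting scans (exact pass, then substring pass)
-- by one scan keeping both candidates: same return value, alternative decomposition.

-- ===== PORT A =====
-- A's first loop: first index whose stripped line equals alert, else -1 (the idx sentinel).
def pvLoopExact (alert : String) : List String → Int → Int
  | [], _ => -1
  | l :: ls, i => if PySem.Str.strip l = alert then i else pvLoopExact alert ls (i + 1)

-- A's second loop: first index whose lowered line contains alert_lower
-- (guarded by 'alert_lower and'), else -1.
def pvLoopSub (al : String) : List String → Int → Int
  | [], _ => -1
  | l :: ls, i =>
      if al ≠ "" ∧ PySem.Str.isIn al (PySem.Str.lower l) then i else pvLoopSub al ls (i + 1)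

def window_around_alert_py (raw_log : String) (selected_alert : String) (radius : Int) : List String :=
  let lines := ((PySem.Str.split? raw_log "\n").getD []).filter
      (fun l => PySem.Str.strip l ≠ "")
  if lines = [] then []
  else
    let alert := PySem.Str.strip selected_alert
    let idx : Int :=
      if alert ≠ "" then
        let e := pvLoopExact alert lines 0
        if e < 0 then pvLoopSub (PySem.Str.lower alert) lines 0 else e
      else -1
    if idx < 0 then
      PySem.List.slice lines (some (-(min (lines.length : Int) (radius * 2 + 1)))) none
    else
      let lo := max 0 (idx - radius)
      let hi := min (lines.length : Int) (idx + radius + 1)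
      PySem.List.slice lines (some lo) (some hi)

-- ===== PORT B =====
-- B's single loop: break with the exact index, remembering the first substring index.
def pvScan (alert al : String) : List String → Int → Option Int → Option Int
  | [], _, sub => sub
  | l :: ls, i, sub =>
      if PySem.Str.strip l = alert then some i
      else pvScan alert al ls (i + 1)
        (if sub = none ∧ PySem.Str.isIn al (PySem.Str.lower l) then some i else sub)

def window_around_alert_py_alt (raw_log : String) (selected_alert : String) (radius : Int) : List String :=
  let lines := ((PySem.Str.split? raw_log "\n").getD []).filter
      (fun l => PySem.Str.strip l ≠ "")
  if lines = [] then []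
  else
    let alert := PySem.Str.strip selected_alert
    let idx : Option Int :=
      if alert ≠ "" then pvScan alert (PySem.Str.lower alert) lines 0 none else none
    match idx with
    | none =>
        PySem.List.slice lines (some (-(min (lines.length : Int) (2 * radius + 1)))) none
    | some i =>
        PySem.List.slice lines (some (max 0 (i - radius)))
          (some (min (lines.length : Int) (i + radius + 1)))

-- ===== PRECONDITION & SPEC =====
def Spec_window_around_alert_py (raw_log : String) (selected_alert : String) (radius : Int) (out : List String) : Prop := out = window_around_alert_py_alt raw_log selected_alert radius
instance (raw_log : String) (selected_alert : String) (radius : Int) (out : List String) : Decidable (Spec_window_around_alert_py raw_log selected_alert radius out) := by unfold Spec_window_around_alert_py; infer_instance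

-- ===== CLAIM (what is proved, stated in full; the proofs are below) =====
def Claim_equal_window_around_alert_py : Prop := ∀ (raw_log : String) (selected_alert : String) (radius : Int), Dom_window_around_alert_py raw_log selected_alert radius → Spec_window_around_alert_py raw_log selected_alert radius (window_around_alert_py raw_log selected_alert radius)

-- ===== LEMMAS AND PROOFS =====

-- B's single scan with break equals A's two scans, for a nonnegative counter and a
-- nonempty substring needle (which makes A's 'alert_lower and' guard always true).
theorem pvScan_eq (alert al : String) (hal : al ≠ "") :
    ∀ (ls : List String) (i : Int) (sub : Option Int), 0 ≤ i →
    pvScan alert al ls i sub =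
      (if pvLoopExact alert ls i < 0 then
        match sub with
        | some s => some s
        | none => if pvLoopSub al ls i < 0 then none else some (pvLoopSub al ls i)
      else some (pvLoopExact alert ls i)) := by
  intro ls
  induction ls with
  | nil =>
      intro i sub _
      cases sub <;> simp [pvScan, pvLoopExact, pvLoopSub]
  | cons l ls ih =>
      intro i sub hi
      simp only [pvScan, pvLoopExact, pvLoopSub]
      by_cases h : PySem.Str.strip l = alert
      · simp only [if_pos h]
        rw [if_neg (by omega : ¬ i < 0)]
      · simp only [if_neg h]
        by_cases hs : PySem.Str.isIn al (PySem.Str.lower l)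
        · rw [if_pos (⟨hal, hs⟩ : al ≠ "" ∧ PySem.Str.isIn al (PySem.Str.lower l) = true)]
          cases sub with
          | some s =>
              rw [if_neg (by simp : ¬ (some s = none ∧ PySem.Str.isIn al (PySem.Str.lower l) = true))]
              rw [ih (i + 1) (some s) (by omega)]
          | none =>
              rw [if_pos (⟨rfl, hs⟩ : (none : Option Int) = none ∧ PySem.Str.isIn al (PySem.Str.lower l) = true)]
              rw [ih (i + 1) (some i) (by omega)]
              rw [if_neg (by omega : ¬ i < 0)]
        · rw [if_neg (show ¬ (sub = none ∧ PySem.Str.isIn al (PySem.Str.lower l) = true) from fun hc => hs hc.2)]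
          rw [if_neg (show ¬ (al ≠ "" ∧ PySem.Str.isIn al (PySem.Str.lower l) = true) from fun hc => hs hc.2)]
          rw [ih (i + 1) sub (by omega)]

-- str.lower() of a nonempty string is nonempty.
theorem lower_ne_empty (s : String) (h : s ≠ "") : PySem.Str.lower s ≠ "" := by
  intro hc
  apply h
  apply String.toList_eq_nil_iff.mp
  have h2 := congrArg String.toList hc
  simp only [PySem.Str.toList_lower] at h2
  cases hx : s.toList with
  | nil => rfl
  | cons c cs => rw [hx] at h2; simp [PySem.Chars.lower] at h2

theorem pv_main_eq (raw_log selected_alert : String) (radius : Int) :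
    window_around_alert_py raw_log selected_alert radius = window_around_alert_py_alt raw_log selected_alert radius := by
  unfold window_around_alert_py window_around_alert_py_alt
  generalize ((PySem.Str.split? raw_log "\n").getD []).filter (fun l => PySem.Str.strip l ≠ "") = L
  by_cases hnil : L = []
  · simp only [if_pos hnil]
  · simp only [if_neg hnil]
    generalize PySem.Str.strip selected_alert = alert
    by_cases ha : alert ≠ ""
    · simp only [if_pos ha]
      rw [pvScan_eq alert (PySem.Str.lower alert) (lower_ne_empty alert ha) L 0 none (le_refl 0)]
      by_cases hlt : pvLoopExact alert L 0 < 0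
      · simp only [if_pos hlt]
        by_cases hslt : pvLoopSub (PySem.Str.lower alert) L 0 < 0
        · simp only [if_pos hslt]
          have hm : (L.length : Int) ⊓ (radius * 2 + 1) = (L.length : Int) ⊓ (2 * radius + 1) := by ring_nf
          rw [hm]
        · simp only [if_neg hslt]
      · simp only [if_neg hlt]
    · simp only [if_neg ha]
      rw [if_pos (show (-1 : Int) < 0 by omega)]
      have hm : (L.length : Int) ⊓ (radius * 2 + 1) = (L.length : Int) ⊓ (2 * radius + 1) := by ring_nf
      rw [hm]

-- ===== VERDICT (by name: the statement is the Claim_ definition above) =====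
theorem window_around_alert_py_spec : Claim_equal_window_around_alert_py := by
  intro raw_log selected_alert radius _
  unfold Spec_window_around_alert_py
  exact pv_main_eq raw_log selected_alert radius
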